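-- pv_equiv track=rewrite | github.com/Q-Vortex/TeleLang | register_sistem.py | has_auth_keys
-- ===== SOURCE A (Python) =====
-- def has_auth_keys(localdata: dict) -> bool:
--     """Проверка, есть ли в localStorage признаки авторизации Telegram"""
--     if not localdata:
--         return False
--     keys = localdata.keys()
--     indicators = ["user_auth", "dc1_auth_key", "dc2_auth_key", "dc3_auth_key", "dc4_auth_key", "dc5_auth_key",
--                   "stel_web_auth", "auth_key", "session_id", "kz_version"]
--     for ind in indicators:
--         if ind in keys:
--             return True
--     for k in keys:
--         if "auth" in k.lower() or k.lower().startswith("dc"):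
--             return True
--     return False
-- ===== SOURCE B (Python) =====
-- def has_auth_keys(localdata: dict) -> bool:
--     """One pass over the keys: indicators not already implied by the
--     auth-substring / dc-prefix tests are checked against a small set."""
--     special = {"session_id", "kz_version"}
--     return any(
--         k in special or "auth" in k.lower() or k.lower().startswith("dc")
--         for k in localdata
--     )
-- ===== Notes on version B (the rewrite author's own statement) =====
-- stated objective: simpler
-- what changed: Replaces the empty-check plus two sequential loops (10 exact-indicator membership tests against the key view, then a scan of the keys) by a single any() pass over the keys, since every indicator except 'session_id'/'kz_version' already contains 'auth'; those two stay as a 2-element set.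
import Mathlib
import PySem

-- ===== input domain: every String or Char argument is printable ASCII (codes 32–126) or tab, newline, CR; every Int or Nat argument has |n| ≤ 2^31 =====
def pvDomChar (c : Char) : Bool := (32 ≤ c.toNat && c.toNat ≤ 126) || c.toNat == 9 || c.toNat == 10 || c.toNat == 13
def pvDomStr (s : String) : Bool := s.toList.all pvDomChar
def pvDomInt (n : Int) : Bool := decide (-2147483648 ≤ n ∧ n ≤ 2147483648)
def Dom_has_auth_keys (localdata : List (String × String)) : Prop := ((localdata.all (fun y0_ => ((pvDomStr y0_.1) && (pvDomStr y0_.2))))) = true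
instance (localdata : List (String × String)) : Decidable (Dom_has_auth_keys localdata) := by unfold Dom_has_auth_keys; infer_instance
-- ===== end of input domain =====

-- B merges A's empty-check and its two sequential loops into a single any() pass over
-- the keys, keeping only the indicators not implied by the auth/dc tests as a set.

-- ===== PORT A =====
-- "auth" in k.lower() or k.lower().startswith("dc")
def pvAuthDc (k : String) : Bool :=
  PySem.Str.isIn "auth" (PySem.Str.lower k) || PySem.Str.startswith (PySem.Str.lower k) "dc"

def pvIndicators : List String :=
  ["user_auth", "dc1_auth_key", "dc2_auth_key", "dc3_auth_key", "dc4_auth_key", "dc5_auth_key",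
   "stel_web_auth", "auth_key", "session_id", "kz_version"]

def has_auth_keys (localdata : List (String × String)) : Bool :=
  if localdata = [] then false       -- if not localdata: return False
  else
    let keys := (PySem.Dict.ofList localdata).keys
    -- for ind in indicators: if ind in keys: return True
    if pvIndicators.any (fun ind => keys.contains ind) then true
    -- for k in keys: if "auth" in k.lower() or k.lower().startswith("dc"): return True
    else keys.any pvAuthDc

-- ===== PORT B =====
def pvSpecial : List String := ["session_id", "kz_version"]   -- the set literal in Source B

def has_auth_keys_alt (localdata : List (String × String)) : Bool :=
  (PySem.Dict.ofList localdata).keys.any (fun k =>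
    pvSpecial.contains k
    || PySem.Str.isIn "auth" (PySem.Str.lower k)
    || PySem.Str.startswith (PySem.Str.lower k) "dc")

-- ===== PRECONDITION & SPEC =====
def Spec_has_auth_keys (localdata : List (String × String)) (out : Bool) : Prop := out = has_auth_keys_alt localdata
instance (localdata : List (String × String)) (out : Bool) : Decidable (Spec_has_auth_keys localdata out) := by unfold Spec_has_auth_keys; infer_instance

-- ===== CLAIM (what is proved, stated in full; the proofs are below) =====
def Claim_equal_has_auth_keys : Prop := ∀ (localdata : List (String × String)), Dom_has_auth_keys localdata → Spec_has_auth_keys localdata (has_auth_keys localdata)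

-- ===== LEMMAS AND PROOFS =====

-- each key checks the indicator list iff it checks the special set or the auth/dc test
theorem pv_pointwise (k : String) :
    (pvIndicators.contains k || pvAuthDc k)
      = (pvSpecial.contains k
          || PySem.Str.isIn "auth" (PySem.Str.lower k)
          || PySem.Str.startswith (PySem.Str.lower k) "dc") := by
  rw [show (pvSpecial.contains k
          || PySem.Str.isIn "auth" (PySem.Str.lower k)
          || PySem.Str.startswith (PySem.Str.lower k) "dc")
        = (pvSpecial.contains k || pvAuthDc k) from by
      simp [pvAuthDc, Bool.or_assoc]]
  by_cases h : k ∈ pvIndicators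
  · fin_cases h <;> decide
  · have h2 : k ∉ pvSpecial := by
      intro hs; apply h; fin_cases hs <;> simp [pvIndicators]
    simp [List.contains_eq_mem, h, h2]

-- membership scan of the indicator list over the keys = scan of the keys over the indicators
theorem pv_swap (keys : List String) :
    pvIndicators.any (fun ind => keys.contains ind)
      = keys.any (fun k => pvIndicators.contains k) := by
  apply Bool.eq_iff_iff.mpr
  simp only [List.any_eq_true, List.contains_eq_mem, decide_eq_true_eq]
  constructor <;> rintro ⟨x, hx, h⟩ <;> exact ⟨x, h, hx⟩

set_option maxHeartbeats 1000000 in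
-- the core equivalence, over an arbitrary key list
theorem pv_core (keys : List String) :
    (if pvIndicators.any (fun ind => keys.contains ind) then true else keys.any pvAuthDc)
      = keys.any (fun k => pvSpecial.contains k
          || PySem.Str.isIn "auth" (PySem.Str.lower k)
          || PySem.Str.startswith (PySem.Str.lower k) "dc") := by
  rw [pv_swap]
  have : ∀ b c : Bool, (if b then true else c) = (b || c) := by decide
  rw [this]
  have hor : ∀ (l : List String) (f g : String → Bool),
      (l.any f || l.any g) = l.any (fun x => f x || g x) := by
    intro l f g
    apply Bool.eq_iff_iff.mpr
    simp only [List.any_eq_true, Bool.or_eq_true]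
    constructor
    · rintro (⟨x, hx, h⟩ | ⟨x, hx, h⟩) <;> exact ⟨x, hx, by simp [h]⟩
    · rintro ⟨x, hx, h | h⟩
      · exact Or.inl ⟨x, hx, h⟩
      · exact Or.inr ⟨x, hx, h⟩
  rw [hor]
  induction keys with
  | nil => rfl
  | cons k t ih =>
    rw [List.any_cons, List.any_cons, ih, pv_pointwise k]

-- ===== VERDICT (by name: the statement is the Claim_ definition above) =====
set_option maxHeartbeats 1000000 in
theorem has_auth_keys_spec : Claim_equal_has_auth_keys := by
  intro localdata _
  unfold Spec_has_auth_keys has_auth_keys has_auth_keys_alt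
  by_cases h : localdata = []
  · subst h; decide
  · simp only [h, if_false]
    exact pv_core _
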